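-- pv_equiv track=rewrite | github.com/mtpauly/advent-of-code | 2023/python/day7/day7.py | get_hand_tiebreaker
-- ===== SOURCE A (Python) =====
-- CARD_VALUES = {
--     "2": 2,
--     "3": 3,
--     "4": 4,
--     "5": 5,
--     "6": 6,
--     "7": 7,
--     "8": 8,
--     "9": 9,
--     "T": 10,
--     "J": 11,
--     "Q": 12,
--     "K": 13,
--     "A": 14,
-- }
--
-- JOKER = "J"
--
-- JOKER_VALUE = 1
--
-- def get_hand_tiebreaker(hand: str, use_joker=False) -> int:
--     values = []
--     for card in hand:
--         if use_joker and card == JOKER: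
--             values.append(JOKER_VALUE)
--         else:
--             values.append(CARD_VALUES[card])
--
--     tiebreaker = 0
--     for value in values:
--         tiebreaker = 100 * tiebreaker + value
--     return tiebreaker
-- ===== SOURCE B (Python) =====
-- CARD_VALUES = {
--     "2": 2, "3": 3, "4": 4, "5": 5, "6": 6, "7": 7, "8": 8, "9": 9,
--     "T": 10, "J": 11, "Q": 12, "K": 13, "A": 14,
-- }
--
-- JOKER = "J"
--
-- JOKER_VALUE = 1
--
-- def get_hand_tiebreaker(hand: str, use_joker=False) -> int:
--     n = len(hand)
--     return sum(
--         (JOKER_VALUE if use_joker and card == JOKER else CARD_VALUES[card])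
--         * 100 ** (n - 1 - i)
--         for i, card in enumerate(hand)
--     )
-- ===== Notes on version B (the rewrite author's own statement) =====
-- stated objective: alternative
-- what changed: Replaces the two-pass build-a-values-list-then-Horner accumulation with a single generator sum of each card's value times its positional weight 100**(n-1-i).
import Mathlib
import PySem

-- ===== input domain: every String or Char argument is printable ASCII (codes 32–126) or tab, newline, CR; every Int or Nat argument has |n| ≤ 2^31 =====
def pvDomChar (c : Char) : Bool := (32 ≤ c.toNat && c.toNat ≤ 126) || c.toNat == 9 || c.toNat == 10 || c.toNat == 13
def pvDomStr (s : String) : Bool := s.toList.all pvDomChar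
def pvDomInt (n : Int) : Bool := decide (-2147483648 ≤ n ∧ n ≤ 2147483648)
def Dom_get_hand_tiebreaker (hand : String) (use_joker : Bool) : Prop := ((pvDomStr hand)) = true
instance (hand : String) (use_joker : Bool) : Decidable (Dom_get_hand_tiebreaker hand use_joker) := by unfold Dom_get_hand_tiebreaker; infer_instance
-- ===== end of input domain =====

-- B replaces A's build-values-list-then-Horner-fold with a one-pass sum of value * 100^(n-1-i); equal on all hands of valid card characters.

-- ===== PORT A =====
-- CARD_VALUES, keyed by the single characters Python iterates a string into
def pvCardValues : PySem.Dict Char Int :=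
  PySem.Dict.ofList [('2', 2), ('3', 3), ('4', 4), ('5', 5), ('6', 6), ('7', 7),
                     ('8', 8), ('9', 9), ('T', 10), ('J', 11), ('Q', 12), ('K', 13), ('A', 14)]

-- CARD_VALUES[card]: Python raises KeyError on a missing key; Pre_ excludes those hands, the default 0 is never used there
def get_hand_tiebreaker (hand : String) (use_joker : Bool) : Int :=
  let values : List Int :=
    hand.toList.foldl
      (fun acc card =>
        if use_joker && card == 'J' then acc ++ [1]
        else acc ++ [pvCardValues.getD card 0]) []
  values.foldl (fun tiebreaker value => 100 * tiebreaker + value) 0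

-- ===== PORT B =====
-- exponent n - 1 - i is ≥ 0 for every enumerated index i, so .toNat is exact there
def get_hand_tiebreaker_alt (hand : String) (use_joker : Bool) : Int :=
  let n : Int := hand.toList.length
  ((PySem.List.enumerate hand.toList).map
    (fun p =>
      (if use_joker && p.2 == 'J' then (1 : Int) else pvCardValues.getD p.2 0)
        * (100 : Int) ^ (n - 1 - p.1).toNat)).sum

-- ===== PRECONDITION & SPEC =====
-- Pre_ excludes hands containing a character that is not a card: there CARD_VALUES[card] raises KeyError in A
-- (when use_joker is true the character 'J' never reaches the lookup, but 'J' is a key anyway, so the condition is the same).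
def Pre_get_hand_tiebreaker (hand : String) (use_joker : Bool) : Prop :=
  hand.toList.all (fun c => c ∈ ['2','3','4','5','6','7','8','9','T','J','Q','K','A']) = true
instance (hand : String) (use_joker : Bool) : Decidable (Pre_get_hand_tiebreaker hand use_joker) := by unfold Pre_get_hand_tiebreaker; infer_instance

def pvWitness_get_hand_tiebreaker : String × Bool := ("AJ25T", true)

def Spec_get_hand_tiebreaker (hand : String) (use_joker : Bool) (out : Int) : Prop := out = get_hand_tiebreaker_alt hand use_joker
instance (hand : String) (use_joker : Bool) (out : Int) : Decidable (Spec_get_hand_tiebreaker hand use_joker out) := by unfold Spec_get_hand_tiebreaker; infer_instance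

-- ===== CLAIM (what is proved, stated in full; the proofs are below) =====
def Claim_equal_get_hand_tiebreaker : Prop := ∀ (hand : String) (use_joker : Bool), Dom_get_hand_tiebreaker hand use_joker → Pre_get_hand_tiebreaker hand use_joker → Spec_get_hand_tiebreaker hand use_joker (get_hand_tiebreaker hand use_joker)

-- ===== LEMMAS AND PROOFS =====

-- shifting the start of an enumeration shifts every index
theorem pv_enumerate_shift {α : Type} (xs : List α) (s : Int) :
    PySem.List.enumerate xs (s + 1) = (PySem.List.enumerate xs s).map (fun p => (p.1 + 1, p.2)) := by
  induction xs generalizing s with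
  | nil => simp only [PySem.List.enumerate_nil, List.map_nil]
  | cons x xs ih =>
    simp only [PySem.List.enumerate_cons, List.map_cons, ih]

-- A's first loop builds exactly the per-card value list (accumulator generalized)
theorem pv_values_eq_map (cs : List Char) (use_joker : Bool) (acc : List Int) :
    cs.foldl
      (fun acc card =>
        if use_joker && card == 'J' then acc ++ [(1 : Int)]
        else acc ++ [pvCardValues.getD card 0]) acc
    = acc ++ cs.map (fun card => if use_joker && card == 'J' then (1 : Int) else pvCardValues.getD card 0) := by
  induction cs generalizing acc with
  | nil => simp only [List.foldl_nil, List.map_nil, List.append_nil]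
  | cons c cs ih =>
    rw [List.foldl_cons, ih, List.map_cons]
    by_cases h : (use_joker && c == 'J') = true
    · simp only [if_pos h, List.append_assoc, List.singleton_append]
    · simp only [if_neg h, List.append_assoc, List.singleton_append]

-- enumerating a mapped list maps the payloads
theorem pv_enumerate_map {α β : Type} (f : α → β) (xs : List α) (s : Int) :
    PySem.List.enumerate (xs.map f) s = (PySem.List.enumerate xs s).map (fun p => (p.1, f p.2)) := by
  induction xs generalizing s with
  | nil => simp only [List.map_nil, PySem.List.enumerate_nil]
  | cons x xs ih => simp only [List.map_cons, PySem.List.enumerate_cons, ih]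

-- Horner accumulation equals the positional-weight sum (generalized over the accumulator)
theorem pv_horner_eq_sum (vals : List Int) (acc : Int) :
    vals.foldl (fun t v => 100 * t + v) acc
      = acc * 100 ^ vals.length
        + ((PySem.List.enumerate vals).map
            (fun p => p.2 * (100 : Int) ^ (((vals.length : Int) - 1 - p.1).toNat))).sum := by
  induction vals generalizing acc with
  | nil => simp only [List.foldl_nil, PySem.List.enumerate_nil, List.map_nil, List.sum_nil,
      List.length_nil, pow_zero, mul_one, add_zero]
  | cons v vs ih =>
    rw [List.foldl_cons, ih, PySem.List.enumerate_cons, pv_enumerate_shift vs 0]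
    simp only [List.map_cons, List.map_map, List.sum_cons, List.length_cons, Function.comp_def]
    have h0 : ((((vs.length : Nat) + 1 : Nat) : Int) - 1 - 0).toNat = vs.length := by omega
    have hw : ∀ p ∈ PySem.List.enumerate vs,
        p.2 * (100 : Int) ^ (((((vs.length : Nat) + 1 : Nat) : Int) - 1 - (p.1 + 1)).toNat)
          = p.2 * (100 : Int) ^ (((vs.length : Int) - 1 - p.1).toNat) := by
      intro p _
      have : ((((vs.length : Nat) + 1 : Nat) : Int) - 1 - (p.1 + 1)).toNat
          = ((vs.length : Int) - 1 - p.1).toNat := by omega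
      rw [this]
    rw [List.map_congr_left hw, h0, pow_succ]
    ring

-- ===== VERDICT (by name: the statement is the Claim_ definition above) =====
theorem get_hand_tiebreaker_spec : Claim_equal_get_hand_tiebreaker := by
  intro hand use_joker _ _
  unfold Spec_get_hand_tiebreaker
  simp only [get_hand_tiebreaker, get_hand_tiebreaker_alt]
  rw [pv_values_eq_map, List.nil_append, pv_horner_eq_sum, pv_enumerate_map,
    List.map_map, List.length_map]
  simp only [Function.comp_def, zero_mul, zero_add]
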